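-- pv_equiv track=rewrite | github.com/thanhttran21/Wainamics | Baseline Subtraction Script.py | parse_other
-- ===== SOURCE A (Python) =====
-- def parse_other(df_other):
--     """ Returns a string of Additional Notes and everything after. """
--     additional_notes = ""
--     found = False
--     for cell in df_other:
--         if "Additional Notes" in cell:
--             found = True
--         if found:
--             additional_notes += cell + "\n"
--     return additional_notes
-- ===== SOURCE B (Python) =====
-- def parse_other(df_other):
--     """ Returns a string of Additional Notes and everything after. """
--     cells = list(df_other)
--     idx = next((i for i, c in enumerate(cells) if "Additional Notes" in c), None)
--     if idx is None:
--         return ""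
--     return "\n".join(cells[idx:]) + "\n"
-- ===== Notes on version B (the rewrite author's own statement) =====
-- stated objective: simpler
-- what changed: Replaces the boolean-flag fold that appends cell by cell with an index-find (first cell containing the marker) followed by a single slice-and-join.
import Mathlib
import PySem

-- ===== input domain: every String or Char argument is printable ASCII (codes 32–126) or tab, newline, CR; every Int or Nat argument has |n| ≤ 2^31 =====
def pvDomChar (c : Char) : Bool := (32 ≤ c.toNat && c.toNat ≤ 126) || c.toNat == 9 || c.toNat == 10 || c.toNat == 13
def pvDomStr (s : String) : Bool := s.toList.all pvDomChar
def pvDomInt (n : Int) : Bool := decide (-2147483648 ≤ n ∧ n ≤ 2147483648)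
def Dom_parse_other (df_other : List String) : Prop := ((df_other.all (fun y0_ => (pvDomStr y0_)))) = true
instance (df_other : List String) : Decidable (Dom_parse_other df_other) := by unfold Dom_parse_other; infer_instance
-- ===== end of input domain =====

-- B replaces A's boolean-flag fold with an index-find followed by one slice-and-join (simpler decomposition; same O(n) cost).


-- ===== PORT A =====
-- String concatenation is carried as List Char (exact: Python's '+' on str is
-- concatenation of the code points) and rebuilt with String.ofList at the end.
def parse_other (df_other : List String) : String :=
  let st := df_other.foldl
    (fun (st : List Char × Bool) cell =>
      let found := st.2 || PySem.Str.isIn "Additional Notes" cell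
      (if found then st.1 ++ cell.toList ++ ['\n'] else st.1, found))
    ([], false)
  String.ofList st.1

-- ===== PORT B =====
def parse_other_alt (df_other : List String) : String :=
  match df_other.findIdx? (fun c => PySem.Str.isIn "Additional Notes" c) with
  | none => ""
  | some i =>
      String.ofList (PySem.Chars.join ['\n'] ((df_other.drop i).map String.toList) ++ ['\n'])

-- ===== PRECONDITION & SPEC =====
def Spec_parse_other (df_other : List String) (out : String) : Prop := out = parse_other_alt df_other
instance (df_other : List String) (out : String) : Decidable (Spec_parse_other df_other out) := by unfold Spec_parse_other; infer_instance

-- ===== CLAIM (what is proved, stated in full; the proofs are below) =====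
def Claim_equal_parse_other : Prop := ∀ (df_other : List String), Dom_parse_other df_other → Spec_parse_other df_other (parse_other df_other)

-- ===== LEMMAS AND PROOFS =====

def pvStep : List Char × Bool → String → List Char × Bool :=
  fun st cell =>
    let found := st.2 || PySem.Str.isIn "Additional Notes" cell
    (if found then st.1 ++ cell.toList ++ ['\n'] else st.1, found)

-- once the flag is set, the fold appends every remaining cell (plus '\n')
theorem pv_fold_true (l : List String) (acc : List Char) :
    l.foldl pvStep (acc, true) = (acc ++ l.flatMap (fun c => c.toList ++ ['\n']), true) := by
  induction l generalizing acc with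
  | nil => simp
  | cons x xs ih => simp [pvStep, ih]

-- the join-plus-trailing-newline of a nonempty list is the flatMap of (cell ++ '\n')
theorem pv_join_flat (x : String) (l : List String) :
    PySem.Chars.join ['\n'] ((x :: l).map String.toList) ++ ['\n']
      = (x :: l).flatMap (fun c => c.toList ++ ['\n']) := by
  induction l generalizing x with
  | nil => simp [PySem.Chars.join_singleton]
  | cons y ys ih =>
      simp only [List.map_cons, PySem.Chars.join_cons_cons, List.flatMap_cons]
      have := ih y
      simp only [List.map_cons, List.flatMap_cons] at this
      simp [← this]

theorem pv_A_fold (l : List String) :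
    parse_other l = String.ofList ((l.foldl pvStep ([], false)).1) := rfl

theorem pv_main (l : List String) : parse_other l = parse_other_alt l := by
  induction l with
  | nil => decide
  | cons x xs ih =>
      rw [pv_A_fold, List.foldl_cons]
      by_cases h : PySem.Str.isIn "Additional Notes" x = true
      · have hst : pvStep ([], false) x = (x.toList ++ ['\n'], true) := by
          have hc : PySem.Chars.isIn ['A','d','d','i','t','i','o','n','a','l',' ','N','o','t','e','s'] x.toList = true := by
            simp only [PySem.Str.isIn_eq] at h
            rwa [show "Additional Notes".toList = ['A','d','d','i','t','i','o','n','a','l',' ','N','o','t','e','s'] from by decide] at h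
          simp [pvStep, hc]
        rw [hst, pv_fold_true]
        show _ = parse_other_alt (x :: xs)
        unfold parse_other_alt
        rw [List.findIdx?_cons, h]
        show String.ofList _ = String.ofList _
        rw [List.drop_zero, pv_join_flat]
        simp
      · have hb : PySem.Str.isIn "Additional Notes" x = false := by simpa using h
        have hc : PySem.Chars.isIn ['A','d','d','i','t','i','o','n','a','l',' ','N','o','t','e','s'] x.toList = false := by
          simp only [PySem.Str.isIn_eq] at hb
          rwa [show "Additional Notes".toList = ['A','d','d','i','t','i','o','n','a','l',' ','N','o','t','e','s'] from by decide] at hb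
        have hst : pvStep ([], false) x = ([], false) := by simp [pvStep, hc]
        rw [hst, ← pv_A_fold, ih]
        unfold parse_other_alt
        rw [List.findIdx?_cons, hb]
        cases xs.findIdx? (fun c => PySem.Str.isIn "Additional Notes" c) with
        | none => simp
        | some i => simp

-- ===== VERDICT (by name: the statement is the Claim_ definition above) =====
theorem parse_other_spec : Claim_equal_parse_other := by
  intro l _
  unfold Spec_parse_other
  exact pv_main l
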